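-- pv_equiv track=rewrite | github.com/xa8zz/erdos-harness | erdos-872/phase3/sparse_subset.py | verify_antichain
-- ===== SOURCE A (Python) =====
-- def verify_antichain(values: set[int] | list[int] | tuple[int, ...], limit: int) -> bool:
--     seen = bytearray(limit + 1)
--     ordered = sorted(values)
--     for value in ordered:
--         if value < 2 or value > limit:
--             return False
--         if seen[value]:
--             return False
--         seen[value] = 1
--     for value in ordered:
--         for multiple in range(value * 2, limit + 1, value):
--             if seen[multiple]:
--                 return False
--     return True
-- ===== SOURCE B (Python) =====
-- def verify_antichain(values, limit):
--     vals = list(values)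
--     present = set(vals)
--     if len(present) != len(vals):
--         return False
--     if any(v < 2 or v > limit for v in vals):
--         return False
--     for v in vals:
--         d = 2
--         while d * d <= v:
--             if v % d == 0 and (d in present or v // d in present):
--                 return False
--             d += 1
--     return True
-- ===== Notes on version B (the rewrite author's own statement) =====
-- stated objective: alternative
-- what changed: replaces the sieve-style scan over all multiples of each value (after building a bytearray of size limit+1 and sorting) with per-element trial division up to sqrt(v) against a hash set of the values, plus separate duplicate/range checks without sorting
import Mathlib
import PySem

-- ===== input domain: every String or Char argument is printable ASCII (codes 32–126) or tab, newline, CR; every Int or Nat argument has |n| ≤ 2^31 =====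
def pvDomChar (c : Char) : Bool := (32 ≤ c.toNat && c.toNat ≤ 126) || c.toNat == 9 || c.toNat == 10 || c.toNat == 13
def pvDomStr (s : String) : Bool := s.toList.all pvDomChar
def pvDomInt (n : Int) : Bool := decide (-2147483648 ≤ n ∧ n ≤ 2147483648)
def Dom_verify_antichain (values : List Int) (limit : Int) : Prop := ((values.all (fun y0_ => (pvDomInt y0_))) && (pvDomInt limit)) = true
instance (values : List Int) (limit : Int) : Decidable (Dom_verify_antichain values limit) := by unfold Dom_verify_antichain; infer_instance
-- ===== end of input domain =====

-- B replaces A's multiples sieve over a size-(limit+1) bytearray (over sorted values) with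
-- trial division to sqrt(v) against a set of the values: a different algorithm of similar cost.

-- ===== PORT A =====
-- The bytearray `seen` is modeled as the set of indices holding 1 (only 0/1 are ever
-- stored, and every read/written index is guarded by 2 ≤ value ≤ limit, hence in range);
-- exact for every read/write A performs.
def pvA_phase1 : List Int → Int → PySem.Set Int → Option (PySem.Set Int)
  | [], _, seen => some seen
  | v :: rest, limit, seen =>
    if v < 2 || limit < v then none
    else if PySem.Set.contains seen v then none
    else pvA_phase1 rest limit (PySem.Set.add seen v)

def verify_antichain (values : List Int) (limit : Int) : Bool :=
  let ordered := PySem.List.sorted values (fun x => x) false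
  match pvA_phase1 ordered limit PySem.Set.empty with
  | none => false
  | some seen =>
      ordered.all (fun v =>
        (PySem.List.pyRange (v * 2) (limit + 1) v).all
          (fun m => !(PySem.Set.contains seen m)))

-- ===== PORT B =====
-- `while d * d <= v:` of Source B
def pvB_while (v : Int) (present : PySem.Set Int) (d : Int) : Bool :=
  if h : d * d ≤ v then
    if PySem.Int.mod v d == 0 &&
        (PySem.Set.contains present d ||
         PySem.Set.contains present (PySem.Int.floordiv v d)) then
      false
    else pvB_while v present (d + 1)
  else true
termination_by (v + 1 - d).toNat
decreasing_by
  have hd : d ≤ v := le_trans (by nlinarith [sq_nonneg d, sq_nonneg (d - 1)] : d ≤ d * d) h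
  omega

def verify_antichain_alt (values : List Int) (limit : Int) : Bool :=
  let present := PySem.Set.ofList values
  if PySem.Set.len present != PySem.List.len values then false
  else if values.any (fun v => v < 2 || limit < v) then false
  else values.all (fun v => pvB_while v present 2)

-- ===== PRECONDITION & SPEC =====
-- Pre_ excludes exactly limit ≤ -2, where A's `bytearray(limit + 1)` raises ValueError.
def Pre_verify_antichain (values : List Int) (limit : Int) : Prop := -1 ≤ limit
instance (values : List Int) (limit : Int) : Decidable (Pre_verify_antichain values limit) := by unfold Pre_verify_antichain; infer_instance
def pvWitness_verify_antichain : List Int × Int := ([2, 3], 4)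

def Spec_verify_antichain (values : List Int) (limit : Int) (out : Bool) : Prop := out = verify_antichain_alt values limit
instance (values : List Int) (limit : Int) (out : Bool) : Decidable (Spec_verify_antichain values limit out) := by unfold Spec_verify_antichain; infer_instance

-- ===== CLAIM (what is proved, stated in full; the proofs are below) =====
def Claim_equal_verify_antichain : Prop := ∀ (values : List Int) (limit : Int), Dom_verify_antichain values limit → Pre_verify_antichain values limit → Spec_verify_antichain values limit (verify_antichain values limit)


-- ===== LEMMAS AND PROOFS =====

-- the common "bad" configuration: one value properly divides another
def pvBad (S : List Int) : Prop := ∃ a ∈ S, ∃ b ∈ S, a < b ∧ a ∣ b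

-- A's first loop succeeds iff all values are in range, distinct, and fresh w.r.t. seen
theorem pv_phase1_some_iff (l : List Int) (limit : Int) (seen : PySem.Set Int) :
    (pvA_phase1 l limit seen).isSome = true ↔
      ((∀ v ∈ l, 2 ≤ v ∧ v ≤ limit) ∧ l.Nodup ∧ ∀ v ∈ l, v ∉ seen) := by
  induction l generalizing seen with
  | nil => simp [pvA_phase1]
  | cons v rest ih =>
    simp only [pvA_phase1]
    by_cases h1 : v < 2 ∨ limit < v
    · rw [if_pos (by simpa using h1)]
      simp only [Option.isSome_none, Bool.false_eq_true, false_iff]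
      rintro ⟨hr, -, -⟩
      have := hr v (by simp)
      omega
    · have h2 : 2 ≤ v ∧ v ≤ limit := by omega
      rw [if_neg (by simpa using h1)]
      by_cases h3 : v ∈ seen
      · rw [if_pos (by simpa [PySem.Set.contains_iff] using h3)]
        simp only [Option.isSome_none, Bool.false_eq_true, false_iff]
        rintro ⟨-, -, hf⟩
        exact hf v (by simp) h3
      · rw [if_neg (by simpa [PySem.Set.contains_iff] using h3), ih]
        constructor
        · rintro ⟨hr, hn, hf⟩
          have hvrest : v ∉ rest := fun hv => (hf v hv) ((PySem.Set.mem_add seen v v).2 (Or.inr rfl))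
          refine ⟨?_, List.nodup_cons.2 ⟨hvrest, hn⟩, ?_⟩
          · intro x hx
            rcases List.mem_cons.1 hx with hxv | hx'
            · exact hxv ▸ h2
            · exact hr x hx'
          · intro x hx hmem
            rcases List.mem_cons.1 hx with hxv | hx'
            · exact h3 (hxv ▸ hmem)
            · exact hf x hx' ((PySem.Set.mem_add seen v x).2 (Or.inl hmem))
        · rintro ⟨hr, hn, hf⟩
          refine ⟨fun x hx => hr x (List.mem_cons_of_mem v hx), (List.nodup_cons.1 hn).2, ?_⟩
          intro x hx hmem
          rcases (PySem.Set.mem_add seen v x).1 hmem with hmm | hxv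
          · exact hf x (List.mem_cons_of_mem v hx) hmm
          · exact (List.nodup_cons.1 hn).1 (hxv ▸ hx)

-- the set A's first loop builds holds exactly seen ∪ l
theorem pv_phase1_mem (l : List Int) (limit : Int) :
    ∀ (seen s : PySem.Set Int), pvA_phase1 l limit seen = some s →
      ∀ x, x ∈ s ↔ x ∈ seen ∨ x ∈ l := by
  induction l with
  | nil =>
    intro seen s h x
    simp only [pvA_phase1, Option.some.injEq] at h
    simp [h.symm]
  | cons v rest ih =>
    intro seen s h x
    simp only [pvA_phase1] at h
    split_ifs at h
    rw [ih _ _ h x, PySem.Set.mem_add]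
    simp only [List.mem_cons]
    tauto

-- B's while loop returns false iff some trial divisor ≥ d succeeds
theorem pv_while_false_iff (v : Int) (p : PySem.Set Int) (d : Int) (hd : 0 ≤ d) :
    pvB_while v p d = false ↔
      ∃ e : Int, d ≤ e ∧ e * e ≤ v ∧ e ∣ v ∧
        (e ∈ p ∨ PySem.Int.floordiv v e ∈ p) := by
  induction d using pvB_while.induct v p with
  | case1 d h hc =>
    rw [pvB_while, dif_pos h, if_pos hc]
    simp only [Bool.and_eq_true, beq_iff_eq, Bool.or_eq_true] at hc
    constructor
    · intro _
      refine ⟨d, le_refl d, h, (PySem.Int.mod_eq_zero_iff_dvd v d).1 hc.1, ?_⟩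
      rcases hc.2 with h' | h'
      · exact Or.inl ((PySem.Set.contains_iff p d).1 h')
      · exact Or.inr ((PySem.Set.contains_iff p (PySem.Int.floordiv v d)).1 h')
    · intro _; rfl
  | case2 d h hc ih =>
    rw [pvB_while, dif_pos h, if_neg hc]
    rw [ih (by omega)]
    constructor
    · rintro ⟨e, he, h2, h3, h4⟩
      exact ⟨e, by omega, h2, h3, h4⟩
    · rintro ⟨e, he, h2, h3, h4⟩
      refine ⟨e, ?_, h2, h3, h4⟩
      rcases eq_or_lt_of_le he with heq' | hlt
      · exfalso
        apply hc
        rw [heq']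
        simp only [Bool.and_eq_true, beq_iff_eq, Bool.or_eq_true]
        refine ⟨(PySem.Int.mod_eq_zero_iff_dvd v e).2 h3, ?_⟩
        rcases h4 with h' | h'
        · exact Or.inl ((PySem.Set.contains_iff p e).2 h')
        · exact Or.inr ((PySem.Set.contains_iff p (PySem.Int.floordiv v e)).2 h')
      · omega
  | case3 d h =>
    rw [pvB_while, dif_neg h]
    simp only [Bool.true_eq_false, false_iff]
    rintro ⟨e, he, h2, -, -⟩
    nlinarith

-- ofList is a sublist, so equal length forces Nodup
theorem pv_ofList_sublist (xs : List Int) : (PySem.Set.ofList xs).Sublist xs := by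
  induction xs using List.reverseRecOn with
  | nil => simp [PySem.Set.ofList]
  | append_singleton xs x ih =>
    rw [PySem.Set.ofList_append_singleton, PySem.Set.add_eq_ite]
    split_ifs
    · exact ih.trans (List.sublist_append_left xs [x])
    · exact ih.append_right [x]

theorem pv_len_ofList_iff (xs : List Int) :
    (PySem.Set.ofList xs).length = xs.length ↔ xs.Nodup := by
  constructor
  · intro h
    have heq := (pv_ofList_sublist xs).eq_of_length h
    rw [← heq]
    exact PySem.Set.nodup_ofList xs
  · intro h
    rw [PySem.Set.ofList_eq_self_of_nodup xs h]

-- A's multiples scan finds a hit iff some value properly divides another (values in range)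
theorem pv_A_bad_iff (S : List Int) (limit : Int)
    (hg : ∀ v ∈ S, 2 ≤ v ∧ v ≤ limit) :
    (∃ v ∈ S, ∃ m ∈ S, v * 2 ≤ m ∧ m < limit + 1 ∧ v ∣ m - v * 2) ↔ pvBad S := by
  constructor
  · rintro ⟨v, hv, m, hm, h1, h2, h3⟩
    have hv2 := (hg v hv).1
    refine ⟨v, hv, m, hm, by omega, ?_⟩
    have hdvd : v ∣ m := by
      have := dvd_add h3 (⟨2, rfl⟩ : v ∣ v * 2)
      simpa using this
    exact hdvd
  · rintro ⟨a, ha, b, hb, hab, k, hk⟩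
    have ha2 := (hg a ha).1
    have hbl := (hg b hb).2
    have hk2 : 2 ≤ k := by
      by_contra hcon
      push_neg at hcon
      have : b ≤ a := by nlinarith
      omega
    refine ⟨a, ha, b, hb, by nlinarith, by omega, ?_⟩
    exact ⟨k - 2, by rw [hk]; ring⟩

-- B's trial division finds a hit iff some value properly divides another (values ≥ 2)
theorem pv_B_bad_iff (S : List Int)
    (hg : ∀ v ∈ S, 2 ≤ v) :
    (∃ v ∈ S, ∃ e : Int, 2 ≤ e ∧ e * e ≤ v ∧ e ∣ v ∧
        (e ∈ S ∨ PySem.Int.floordiv v e ∈ S)) ↔ pvBad S := by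
  constructor
  · rintro ⟨v, hv, e, he2, hee, hdvd, hmem⟩
    rcases hmem with hm | hm
    · exact ⟨e, hm, v, hv, by nlinarith, hdvd⟩
    · set f := PySem.Int.floordiv v e with hfdef
      have hfe : f = v / e := PySem.Int.floordiv_eq_ediv_of_pos (by omega)
      have hvef : e * f = v := by
        rw [hfe]
        exact Int.mul_ediv_cancel' hdvd
      have hfpos : e ≤ f := by
        have hmul : e * e ≤ e * f := by rw [hvef]; exact hee
        exact le_of_mul_le_mul_left hmul (by omega)
      refine ⟨f, hm, v, hv, by nlinarith, ⟨e, by rw [← hvef]; ring⟩⟩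
  · rintro ⟨a, ha, b, hb, hab, k, hk⟩
    have ha2 := hg a ha
    have hk2 : 2 ≤ k := by
      by_contra hcon
      push_neg at hcon
      have : b ≤ a := by nlinarith
      omega
    by_cases hle : a * a ≤ b
    · exact ⟨b, hb, a, ha2, hle, ⟨k, hk⟩, Or.inl ha⟩
    · push_neg at hle
      have hka : k < a := by nlinarith
      refine ⟨b, hb, k, hk2, by nlinarith, ⟨a, by rw [hk]; ring⟩, Or.inr ?_⟩
      have hfd : PySem.Int.floordiv b k = a := by
        rw [PySem.Int.floordiv_eq_ediv_of_pos (by omega : (0:Int) < k), hk, mul_comm]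
        exact Int.mul_ediv_cancel_left a (by omega)
      rw [hfd]
      exact ha

-- A's port computes: range + distinctness + no proper divisibility
theorem pv_A_true_iff (values : List Int) (limit : Int) :
    verify_antichain values limit = true ↔
      ((∀ v ∈ values, 2 ≤ v ∧ v ≤ limit) ∧ values.Nodup ∧ ¬ pvBad values) := by
  unfold verify_antichain
  have hperm := PySem.List.sorted_perm values (fun x => x) false
  have hmemiff : ∀ x : Int, x ∈ PySem.List.sorted values (fun x => x) false ↔ x ∈ values :=
    fun x => hperm.mem_iff
  cases heq : pvA_phase1 (PySem.List.sorted values (fun x => x) false) limit PySem.Set.empty with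
  | none =>
    simp only [heq, Bool.false_eq_true, false_iff]
    rintro ⟨hr, hn, -⟩
    have hsome : (pvA_phase1 (PySem.List.sorted values (fun x => x) false) limit PySem.Set.empty).isSome = true := by
      rw [pv_phase1_some_iff]
      refine ⟨fun v hv => hr v ((hmemiff v).1 hv), hperm.nodup_iff.2 hn, ?_⟩
      intro v _ hmem
      simp [PySem.Set.empty] at hmem
    rw [heq] at hsome
    simp at hsome
  | some seen =>
    have h1 := (pv_phase1_some_iff (PySem.List.sorted values (fun x => x) false) limit PySem.Set.empty).1
      (by rw [heq]; rfl)
    obtain ⟨hrO, hnO, -⟩ := h1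
    have hr : ∀ v ∈ values, 2 ≤ v ∧ v ≤ limit := fun v hv => hrO v ((hmemiff v).2 hv)
    have hn : values.Nodup := hperm.nodup_iff.1 hnO
    have hseen : ∀ x : Int, x ∈ seen ↔ x ∈ values := by
      intro x
      rw [pv_phase1_mem _ limit _ seen heq x]
      simp [PySem.Set.empty, hmemiff x]
    simp only [heq]
    rw [List.all_eq_true]
    constructor
    · intro hall
      refine ⟨hr, hn, ?_⟩
      rw [← pv_A_bad_iff values limit hr]
      rintro ⟨v, hv, m, hm, hge, hlt, hdvd⟩
      have hv2 := (hr v hv).1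
      have hvall := hall v ((hmemiff v).2 hv)
      rw [List.all_eq_true] at hvall
      have hmr : m ∈ PySem.List.pyRange (v * 2) (limit + 1) v :=
        (PySem.List.mem_pyRange_iff_of_pos (by omega) m).2 ⟨hge, hlt, hdvd⟩
      have hcontra := hvall m hmr
      simp only [Bool.not_eq_eq_eq_not, Bool.not_true] at hcontra
      rw [(PySem.Set.contains_iff seen m).2 ((hseen m).2 hm)] at hcontra
      exact Bool.noConfusion hcontra
    · rintro ⟨-, -, hnb⟩ v hvO
      rw [List.all_eq_true]
      intro m hmr
      have hv2 := (hrO v hvO).1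
      obtain ⟨hge, hlt, hdvd⟩ := (PySem.List.mem_pyRange_iff_of_pos (by omega : (0:Int) < v) m).1 hmr
      simp only [Bool.not_eq_eq_eq_not, Bool.not_true]
      rw [Bool.eq_false_iff]
      intro hcont
      have hm : m ∈ values := (hseen m).1 ((PySem.Set.contains_iff seen m).1 hcont)
      exact hnb ((pv_A_bad_iff values limit hr).1
        ⟨v, (hmemiff v).1 hvO, m, hm, hge, hlt, hdvd⟩)

-- B's port computes the same three conditions
theorem pv_B_true_iff (values : List Int) (limit : Int) :
    verify_antichain_alt values limit = true ↔
      ((∀ v ∈ values, 2 ≤ v ∧ v ≤ limit) ∧ values.Nodup ∧ ¬ pvBad values) := by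
  rw [show verify_antichain_alt values limit =
        (if (PySem.Set.len (PySem.Set.ofList values) != PySem.List.len values) = true then false
         else if (values.any fun v => decide (v < 2) || decide (limit < v)) = true then false
         else values.all fun v => pvB_while v (PySem.Set.ofList values) 2) from rfl]
  by_cases hn : values.Nodup
  · have hlen : (PySem.Set.len (PySem.Set.ofList values) != PySem.List.len values) = false := by
      have := (pv_len_ofList_iff values).2 hn
      simp [PySem.Set.len, PySem.List.len_eq, this]
    rw [hlen]
    simp only [Bool.false_eq_true, if_false]
    by_cases hr : ∀ v ∈ values, 2 ≤ v ∧ v ≤ limit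
    · have hany : values.any (fun v => decide (v < 2) || decide (limit < v)) = false := by
        rw [List.any_eq_false]
        intro v hv
        have := hr v hv
        simp only [Bool.or_eq_true, decide_eq_true_eq, not_or]
        omega
      rw [hany]
      simp only [Bool.false_eq_true, if_false]
      rw [List.all_eq_true]
      constructor
      · intro hall
        refine ⟨hr, hn, ?_⟩
        rw [← pv_B_bad_iff values (fun v hv => (hr v hv).1)]
        rintro ⟨v, hv, e, he2, hee, hdvd, hmem⟩
        have hall_v := hall v hv
        have hfalse : pvB_while v (PySem.Set.ofList values) 2 = false := by
          rw [pv_while_false_iff v _ 2 (by omega)]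
          refine ⟨e, he2, hee, hdvd, ?_⟩
          rcases hmem with h' | h'
          · exact Or.inl ((PySem.Set.mem_ofList values e).2 h')
          · exact Or.inr ((PySem.Set.mem_ofList values (PySem.Int.floordiv v e)).2 h')
        rw [hall_v] at hfalse
        exact Bool.noConfusion hfalse
      · rintro ⟨-, -, hnb⟩ v hv
        by_contra hcon
        rw [Bool.not_eq_true, pv_while_false_iff v _ 2 (by omega)] at hcon
        obtain ⟨e, he2, hee, hdvd, hmem⟩ := hcon
        apply hnb
        rw [← pv_B_bad_iff values (fun w hw => (hr w hw).1)]
        refine ⟨v, hv, e, he2, hee, hdvd, ?_⟩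
        rcases hmem with h' | h'
        · exact Or.inl ((PySem.Set.mem_ofList values e).1 h')
        · exact Or.inr ((PySem.Set.mem_ofList values (PySem.Int.floordiv v e)).1 h')
    · have hany : values.any (fun v => decide (v < 2) || decide (limit < v)) = true := by
        rw [List.any_eq_true]
        push_neg at hr
        obtain ⟨v, hv, hbad⟩ := hr
        refine ⟨v, hv, ?_⟩
        simp only [Bool.or_eq_true, decide_eq_true_eq]
        omega
      rw [hany]
      simp only [if_true, Bool.false_eq_true, false_iff]
      rintro ⟨hr', -, -⟩
      exact hr hr'
  · have hlen : (PySem.Set.len (PySem.Set.ofList values) != PySem.List.len values) = true := by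
      have hne : (PySem.Set.ofList values).length ≠ values.length := fun h => hn ((pv_len_ofList_iff values).1 h)
      simp [PySem.Set.len, PySem.List.len_eq]
      omega
    rw [hlen]
    simp only [if_true, Bool.false_eq_true, false_iff]
    rintro ⟨-, hn', -⟩
    exact hn hn'

-- ===== VERDICT (by name: the statement is the Claim_ definition above) =====
theorem verify_antichain_spec : Claim_equal_verify_antichain := by
  intro values limit _hdom _hpre
  unfold Spec_verify_antichain
  rw [Bool.eq_iff_iff, pv_A_true_iff, pv_B_true_iff]
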